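-- pv_equiv track=rewrite | github.com/CryAndRRich/hustack | leetcode/graph/2247_Maximum_Cost_of_Trip_With_K_Highways/codes/dp.py | maximumCost
-- ===== SOURCE A (Python) =====
-- from typing import List
--
-- def maximumCost(n: int, highways: List[List[int]], k: int) -> int:
--     graph = [[] for _ in range(n)]
--     for u, v, cost in highways:
--         graph[u].append((v, cost))
--         graph[v].append((u, cost))
--
--     if k + 1 > n:
--         return -1
--
--     max_mask = 1 << n
--     dp = [[-1] * n for _ in range(max_mask)]
--
--     for i in range(n):
--         dp[1 << i][i] = 0
--
--     ans = -1
--     for mask in range(max_mask):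
--         count = bin(mask).count('1')
--         if count > k + 1:
--             continue
--         for u in range(n):
--             if dp[mask][u] == -1:
--                 continue
--             if count == k + 1:
--                 ans = max(ans, dp[mask][u])
--                 continue
--             for v, cost in graph[u]:
--                 if (mask & (1 << v)) == 0:
--                     new_mask = mask | (1 << v)
--                     dp[new_mask][v] = max(dp[new_mask][v], dp[mask][u] + cost)
--
--     return ans
-- ===== SOURCE B (Python) =====
-- from typing import List
--
-- def maximumCost(n: int, highways: List[List[int]], k: int) -> int:
--     # Top-down memoized recursion instead of A's bottom-up 2^n x n table sweep.
--     graph = [[] for _ in range(n)]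
--     for u, v, cost in highways:
--         graph[u].append((v, cost))
--         graph[v].append((u, cost))
--
--     if k + 1 > n:
--         return -1
--
--     memo = {}
--
--     def f(mask: int, u: int) -> int:
--         # best cost of a simple path visiting exactly the cities in mask, ending at u
--         if mask == (1 << u):
--             return 0
--         key = (mask, u)
--         if key in memo:
--             return memo[key]
--         sub = mask ^ (1 << u)
--         best = -1
--         for w, c in graph[u]:
--             if (sub >> w) & 1:
--                 r = f(sub, w)
--                 if r != -1:
--                     best = max(best, r + c)
--         memo[key] = best
--         return best
--
--     ans = -1
--     for mask in range(1 << n):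
--         if bin(mask).count('1') == k + 1:
--             for u in range(n):
--                 if (mask >> u) & 1:
--                     ans = max(ans, f(mask, u))
--     return ans
-- ===== Notes on version B (the rewrite author's own statement) =====
-- stated objective: alternative
-- what changed: Replaces A's bottom-up relaxation sweep over the full 2^n x n table (pushing dp[mask][u]+cost into dp[mask|1<<v][v] in mask order) by a top-down memoized recursion f(mask,u) that pulls the best path value ending at u over the visited set mask from its sub-states, evaluated only at the (k+1)-city masks.
-- outside the precondition, e.g. on maximumCost(2, [[-1, 0, 5]], 0): A returns 0, B returns 0; on maximumCost(2, [[-1, 0, 5]], -1): A returns -1, B returns -1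
import Mathlib
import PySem

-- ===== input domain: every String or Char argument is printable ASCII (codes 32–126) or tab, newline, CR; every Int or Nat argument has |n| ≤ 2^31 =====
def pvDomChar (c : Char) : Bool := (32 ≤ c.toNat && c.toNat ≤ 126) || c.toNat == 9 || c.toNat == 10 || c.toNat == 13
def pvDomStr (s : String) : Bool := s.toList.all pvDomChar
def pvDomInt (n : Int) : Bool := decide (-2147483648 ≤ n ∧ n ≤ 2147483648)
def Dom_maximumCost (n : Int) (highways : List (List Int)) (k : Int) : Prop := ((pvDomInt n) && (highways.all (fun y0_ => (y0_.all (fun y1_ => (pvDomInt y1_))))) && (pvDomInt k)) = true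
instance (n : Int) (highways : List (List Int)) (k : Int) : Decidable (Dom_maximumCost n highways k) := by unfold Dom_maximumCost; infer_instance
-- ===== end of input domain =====

-- B replaces A's bottom-up sweep over the full 2^n × n dp table by a top-down recursion
-- f(mask,u) (memoized in Source B; recomputed here) evaluated only at the (k+1)-city masks.

-- ===== PORT A =====
-- graph[u].append((v, cost)) : the Python list-of-lists `graph` is modeled as a function
-- Int → List (Int × Int) updated pointwise (exact for the in-range indices Pre_ admits;
-- a malformed row, on which Python raises, is skipped).
def pvAddEdge (g : Int → List (Int × Int)) (u v c : Int) : Int → List (Int × Int) :=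
  fun x => if x = u then g x ++ [(v, c)] else g x

def pvBuildGraph (hws : List (List Int)) : Int → List (Int × Int) :=
  hws.foldl (fun g row =>
    match row with
    | [u, v, c] => pvAddEdge (pvAddEdge g u v c) v u c
    | _ => g) (fun _ => [])

-- bin(mask).count('1')
def pvPopcount (m : Nat) : Nat :=
  if m = 0 then 0 else m % 2 + pvPopcount (m / 2)
decreasing_by exact Nat.div_lt_self (by omega) (by omega)

-- dp = [[-1]*n for _ in range(max_mask)]; dp[1 << i][i] = 0 for i in range(n)
-- (the 2D list is modeled as a function Nat → Nat → Int updated pointwise)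
def pvDpInit (N : Nat) : Nat → Nat → Int :=
  (List.range N).foldl (fun dp i => fun m u => if m = 1 <<< i ∧ u = i then 0 else dp m u)
    (fun _ _ => -1)

-- the body of A's `for mask in range(max_mask)` loop; state = (dp, ans)
-- `1 <<< p.1.toNat` ports Python's `1 << v` (exact for v ≥ 0, which Pre_ guarantees)
def pvAStep (g : Int → List (Int × Int)) (k : Int) (N : Nat)
    (st : (Nat → Nat → Int) × Int) (mask : Nat) : (Nat → Nat → Int) × Int :=
  let count := pvPopcount mask
  if (count : Int) > k + 1 then st
  else
    (List.range N).foldl (fun st2 u =>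
      if st2.1 mask u = -1 then st2
      else if (count : Int) = k + 1 then (st2.1, max st2.2 (st2.1 mask u))
      else
        (g u).foldl (fun st3 p =>
          if mask &&& (1 <<< p.1.toNat) = 0 then
            (fun m w => if m = mask ||| (1 <<< p.1.toNat) ∧ w = p.1.toNat
                        then max (st3.1 m w) (st3.1 mask u + p.2) else st3.1 m w, st3.2)
          else st3) st2) st

def maximumCost (n : Int) (highways : List (List Int)) (k : Int) : Int :=
  let graph := pvBuildGraph highways
  if k + 1 > n then -1
  else
    ((List.range (1 <<< n.toNat)).foldl (pvAStep graph k n.toNat) (pvDpInit n.toNat, -1)).2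

-- ===== PORT B =====
-- termination of the recursion: removing a set bit strictly decreases the mask
theorem pvXorTwoPowLt (M u : Nat) (h : M.testBit u = true) : M ^^^ (1 <<< u) < M := by
  rw [Nat.one_shiftLeft]
  refine Nat.lt_of_testBit u ?_ h ?_
  · simp [Nat.testBit_xor, h]
  · intro j hj
    simp only [Nat.testBit_xor, Nat.testBit_two_pow]
    have : u ≠ j := by omega
    simp [this]

-- f(mask, u) of Source B (memoized there; recomputed here — same values).
-- `testBit` ports `(sub >> w) & 1`, exact for w ≥ 0 (guaranteed by Pre_);
-- the outer `testBit` guard only makes the recursion total: Source B calls f only on u ∈ mask.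
def pvF (g : Int → List (Int × Int)) (mask : Nat) (u : Nat) : Int :=
  if mask = 1 <<< u then 0
  else if h : mask.testBit u = true then
    (g u).foldl (fun best p =>
      if (mask ^^^ (1 <<< u)).testBit p.1.toNat then
        if pvF g (mask ^^^ (1 <<< u)) p.1.toNat ≠ -1 then
          max best (pvF g (mask ^^^ (1 <<< u)) p.1.toNat + p.2)
        else best
      else best) (-1)
  else -1
termination_by mask
decreasing_by exact pvXorTwoPowLt _ _ h

-- the body of Source B's answer loop over masks
def pvBStep (g : Int → List (Int × Int)) (N : Nat) (k : Int) (ans : Int) (mask : Nat) : Int :=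
  if (pvPopcount mask : Int) = k + 1 then
    (List.range N).foldl (fun a u => if mask.testBit u then max a (pvF g mask u) else a) ans
  else ans

def maximumCost_alt (n : Int) (highways : List (List Int)) (k : Int) : Int :=
  let graph := pvBuildGraph highways
  if k + 1 > n then -1
  else (List.range (1 <<< n.toNat)).foldl (pvBStep graph n.toNat k) (-1)

-- ===== PRECONDITION & SPEC =====
def pvRowOK (n : Int) (row : List Int) : Bool :=
  match row with
  | [u, v, _] => decide (0 ≤ u ∧ u < n ∧ 0 ≤ v ∧ v < n)
  | _ => false

def pvRowOKW (n : Int) (row : List Int) : Bool :=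
  match row with
  | [u, v, _] => decide (-n ≤ u ∧ u < n ∧ -n ≤ v ∧ v < n)
  | _ => false

-- Pre_ admits the task's natural domain (0 ≤ n, every highway a triple [u,v,cost] with
-- 0 ≤ u,v < n) plus the k+1 > n early-return corners where Python's negative-index
-- wraparound does not raise; outside Pre_ A raises (ValueError unpacking a non-triple,
-- IndexError / ValueError on out-of-range vertices) except for a few remaining
-- wraparound corners with k ≤ 0, on which B happens to return the same value anyway.
def Pre_maximumCost (n : Int) (highways : List (List Int)) (k : Int) : Prop :=
  (0 ≤ n ∧ highways.all (pvRowOK n) = true) ∨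
  (k + 1 > n ∧ highways.all (pvRowOKW n) = true ∧ (0 ≤ n ∨ highways = []))
instance (n : Int) (highways : List (List Int)) (k : Int) : Decidable (Pre_maximumCost n highways k) := by
  unfold Pre_maximumCost; infer_instance

def pvWitness_maximumCost : Int × List (List Int) × Int := (3, [[0, 1, 4], [1, 2, 2]], 1)

def Spec_maximumCost (n : Int) (highways : List (List Int)) (k : Int) (out : Int) : Prop :=
  out = maximumCost_alt n highways k
instance (n : Int) (highways : List (List Int)) (k : Int) (out : Int) : Decidable (Spec_maximumCost n highways k out) := by
  unfold Spec_maximumCost; infer_instance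

-- ===== CLAIM (what is proved, stated in full; the proofs are below) =====
def Claim_equal_maximumCost : Prop := ∀ (n : Int) (highways : List (List Int)) (k : Int),
  Dom_maximumCost n highways k → Pre_maximumCost n highways k →
  Spec_maximumCost n highways k (maximumCost n highways k)

-- ===== LEMMAS AND PROOFS =====

-- ---- small bit lemmas ----
theorem pvAndTwoPowZero (t w : Nat) : t &&& (1 <<< w) = 0 ↔ t.testBit w = false := by
  rw [Nat.one_shiftLeft, Nat.and_two_pow]
  cases h : t.testBit w <;> simp [h, Nat.pow_eq_zero]

theorem pvOrTestBitSelf (t w : Nat) : (t ||| (1 <<< w)).testBit w = true := by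
  simp [Nat.testBit_or, Nat.one_shiftLeft]

theorem pvOrXor (t w : Nat) (h : t.testBit w = false) :
    (t ||| (1 <<< w)) ^^^ (1 <<< w) = t := by
  refine Nat.eq_of_testBit_eq fun i => ?_
  simp only [Nat.testBit_xor, Nat.testBit_or, Nat.one_shiftLeft, Nat.testBit_two_pow]
  by_cases hi : w = i
  · subst hi; simp [h]
  · simp [hi]

theorem pvXorOr (M w : Nat) (h : M.testBit w = true) :
    (M ^^^ (1 <<< w)) ||| (1 <<< w) = M := by
  refine Nat.eq_of_testBit_eq fun i => ?_
  simp only [Nat.testBit_xor, Nat.testBit_or, Nat.one_shiftLeft, Nat.testBit_two_pow]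
  by_cases hi : w = i
  · subst hi; simp [h]
  · simp [hi]

theorem pvOrNe (t w : Nat) (h : t.testBit w = false) : t ||| (1 <<< w) ≠ t := by
  intro he
  have := pvOrTestBitSelf t w
  rw [he] at this
  rw [this] at h; cases h

theorem pvOrEqPow (t w : Nat) (h : t.testBit w = false) (he : t ||| (1 <<< w) = 1 <<< w) :
    t = 0 := by
  refine Nat.eq_of_testBit_eq fun i => ?_
  simp only [Nat.zero_testBit]
  by_cases hi : w = i
  · subst hi; exact h
  · have := congrArg (fun x => Nat.testBit x i) he
    simpa [Nat.testBit_or, Nat.one_shiftLeft, Nat.testBit_two_pow, hi] using this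

theorem pvPopcount_eq (m : Nat) : pvPopcount m = m % 2 + pvPopcount (m / 2) := by
  rw [pvPopcount]
  split
  · subst ‹m = 0›; simp [pvPopcount]
  · rfl

theorem pvModTwoOfTestBit (a b : Nat) (h : a.testBit 0 = b.testBit 0) : a % 2 = b % 2 := by
  simp only [Nat.testBit_zero, decide_eq_decide] at h
  omega

theorem pvDivTwoOr (a b : Nat) : (a ||| b) / 2 = a / 2 ||| b / 2 := by
  refine Nat.eq_of_testBit_eq fun i => ?_
  simp [Nat.testBit_div_two, Nat.testBit_or]

theorem pvPopcountOr (t w : Nat) (h : t.testBit w = false) :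
    pvPopcount (t ||| (1 <<< w)) = pvPopcount t + 1 := by
  induction w generalizing t with
  | zero =>
    have hb : (t ||| 1 <<< 0).testBit 0 = true := pvOrTestBitSelf t 0
    have hm : (t ||| 1 <<< 0) % 2 = 1 := by
      simp only [Nat.testBit_zero, decide_eq_true_eq] at hb; exact hb
    have hd : (t ||| 1 <<< 0) / 2 = t / 2 := by
      rw [pvDivTwoOr]; norm_num
    have hm0 : t % 2 = 0 := by
      simp only [Nat.testBit_zero, decide_eq_false_iff_not] at h; omega
    rw [pvPopcount_eq (t ||| 1 <<< 0), pvPopcount_eq t, hm, hd, hm0]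
    omega
  | succ w ih =>
    have hm : (t ||| 1 <<< (w + 1)) % 2 = t % 2 := by
      refine pvModTwoOfTestBit _ _ ?_
      simp [Nat.testBit_or, Nat.one_shiftLeft, Nat.testBit_two_pow]
    have hd : (t ||| 1 <<< (w + 1)) / 2 = t / 2 ||| 1 <<< w := by
      rw [pvDivTwoOr]
      congr 1
      refine Nat.eq_of_testBit_eq fun i => ?_
      simp [Nat.testBit_div_two, Nat.one_shiftLeft, Nat.testBit_two_pow]
    have h' : (t / 2).testBit w = false := by
      rw [Nat.testBit_div_two]; exact h
    rw [pvPopcount_eq (t ||| 1 <<< (w + 1)), pvPopcount_eq t, hm, hd, ih _ h']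
    omega

-- ---- graph lemmas ----
theorem pvGraphSym (hws : List (List Int)) (a b c : Int) :
    (b, c) ∈ pvBuildGraph hws a ↔ (a, c) ∈ pvBuildGraph hws b := by
  suffices h : ∀ (g0 : Int → List (Int × Int)),
      (∀ a b c, (b, c) ∈ g0 a ↔ (a, c) ∈ g0 b) →
      ∀ a b c, (b, c) ∈ (hws.foldl (fun g row =>
        match row with
        | [u, v, c] => pvAddEdge (pvAddEdge g u v c) v u c
        | _ => g) g0) a ↔ (a, c) ∈ (hws.foldl (fun g row =>
        match row with
        | [u, v, c] => pvAddEdge (pvAddEdge g u v c) v u c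
        | _ => g) g0) b by
    exact h _ (by simp) a b c
  induction hws with
  | nil => intro g0 hg0; exact hg0
  | cons row rest ih =>
    intro g0 hg0 a b c
    simp only [List.foldl_cons]
    refine ih _ ?_ a b c
    rcases row with _ | ⟨u, _ | ⟨v, _ | ⟨c0, _ | ⟨x, r⟩⟩⟩⟩ <;> try exact hg0
    intro a b c
    have key : ∀ a b c, (b, c) ∈ pvAddEdge (pvAddEdge g0 u v c0) v u c0 a ↔
        ((b, c) ∈ g0 a ∨ (a = u ∧ b = v ∧ c = c0) ∨ (a = v ∧ b = u ∧ c = c0)) := by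
      intro a b c
      simp only [pvAddEdge]
      split_ifs with h1 h2 h2 <;> subst_eqs <;> simp_all <;> tauto
    rw [key, key]
    constructor
    · rintro (h | ⟨rfl, rfl, rfl⟩ | ⟨rfl, rfl, rfl⟩)
      · exact Or.inl ((hg0 a b c).mp h)
      · tauto
      · tauto
    · rintro (h | ⟨rfl, rfl, rfl⟩ | ⟨rfl, rfl, rfl⟩)
      · exact Or.inl ((hg0 a b c).mpr h)
      · tauto
      · tauto

theorem pvGraphBnd (n : Int) (hws : List (List Int)) (hpre : hws.all (pvRowOK n) = true)
    (x : Int) (p : Int × Int) (hp : p ∈ pvBuildGraph hws x) : 0 ≤ p.1 ∧ p.1 < n := by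
  rw [List.all_eq_true] at hpre
  revert hp
  suffices h : ∀ (g0 : Int → List (Int × Int)),
      (∀ x p, p ∈ g0 x → 0 ≤ p.1 ∧ p.1 < n) →
      ∀ x p, p ∈ (hws.foldl (fun g row =>
        match row with
        | [u, v, c] => pvAddEdge (pvAddEdge g u v c) v u c
        | _ => g) g0) x → 0 ≤ p.1 ∧ p.1 < n by
    intro hp
    exact h _ (by simp) x p hp
  clear x p
  induction hws with
  | nil => intro g0 hg0; exact hg0
  | cons row rest ih =>
    intro g0 hg0
    simp only [List.foldl_cons]
    refine ih (fun r hr => hpre r (by simp [hr])) _ ?_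
    have hrow := hpre row (by simp)
    rcases row with _ | ⟨u, _ | ⟨v, _ | ⟨c0, _ | ⟨y, r⟩⟩⟩⟩ <;> simp [pvRowOK] at hrow <;> try exact hg0
    have key : ∀ x p, p ∈ pvAddEdge (pvAddEdge g0 u v c0) v u c0 x →
        p ∈ g0 x ∨ p = (v, c0) ∨ p = (u, c0) := by
      intro x p hp
      simp only [pvAddEdge] at hp
      split_ifs at hp <;> (try simp at hp) <;> tauto
    intro x p hp
    rcases key x p hp with hp | rfl | rfl
    · exact hg0 x p hp
    · refine ⟨by simp; omega, by simp; omega⟩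
    · refine ⟨by simp; omega, by simp; omega⟩

-- ---- generic conditional-max fold lemmas ----
theorem pvFoldMonoGe {α : Type} (s : Int → α → Int) (hs : ∀ a x, a ≤ s a x) :
    ∀ (L : List α) (a : Int), a ≤ L.foldl s a := by
  intro L
  induction L with
  | nil => intro a; simp
  | cons x xs ih => intro a; exact le_trans (hs a x) (ih (s a x))

theorem pvCmaxLe {α : Type} (C : α → Prop) [DecidablePred C] (f : α → Int) :
    ∀ (L : List α) (a b : Int), a ≤ b → (∀ x ∈ L, C x → f x ≤ b) →
    L.foldl (fun a x => if C x then max a (f x) else a) a ≤ b := by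
  intro L
  induction L with
  | nil => intro a b h _; simpa using h
  | cons x xs ih =>
    intro a b h hx
    simp only [List.foldl_cons]
    refine ih _ _ ?_ (fun y hy => hx y (by simp [hy]))
    split
    · exact max_le h (hx x (by simp) ‹_›)
    · exact h

theorem pvCmaxGeElem {α : Type} (C : α → Prop) [DecidablePred C] (f : α → Int) :
    ∀ (L : List α) (a : Int) (x : α), x ∈ L → C x →
    f x ≤ L.foldl (fun a x => if C x then max a (f x) else a) a := by
  intro L
  induction L with
  | nil => intro a x hx; cases hx
  | cons y ys ih =>
    intro a x hx hC
    simp only [List.foldl_cons]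
    rcases List.mem_cons.mp hx with rfl | hmem
    · refine le_trans ?_ (pvFoldMonoGe _ (fun a x => by split <;> simp) ys _)
      simp [hC]
    · exact ih _ x hmem hC

theorem pvCmaxId {α : Type} (C : α → Prop) [DecidablePred C] (f : α → Int) :
    ∀ (L : List α) (a : Int), (∀ x ∈ L, ¬ C x) →
    L.foldl (fun a x => if C x then max a (f x) else a) a = a := by
  intro L
  induction L with
  | nil => intro a _; rfl
  | cons x xs ih =>
    intro a h
    simp only [List.foldl_cons]
    rw [if_neg (h x (by simp))]
    exact ih a (fun y hy => h y (by simp [hy]))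


-- ---- nested conditional-max fold lemmas ----
theorem pvNestGeInit {β : Type} (P : Nat → Prop) [DecidablePred P] (G : Nat → List β)
    (C : Nat → β → Prop) [∀ u, DecidablePred (C u)] (f : Nat → β → Int) (L : List Nat) (a : Int) :
    a ≤ L.foldl (fun a u => if P u then a
      else (G u).foldl (fun a p => if C u p then max a (f u p) else a) a) a := by
  refine pvFoldMonoGe _ (fun a u => ?_) L a
  split
  · exact le_refl a
  · exact pvFoldMonoGe _ (fun a p => by split <;> simp) _ a

theorem pvNestLe {β : Type} (P : Nat → Prop) [DecidablePred P] (G : Nat → List β)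
    (C : Nat → β → Prop) [∀ u, DecidablePred (C u)] (f : Nat → β → Int) :
    ∀ (L : List Nat) (a b : Int), a ≤ b → (∀ u ∈ L, ¬ P u → ∀ p ∈ G u, C u p → f u p ≤ b) →
    L.foldl (fun a u => if P u then a
      else (G u).foldl (fun a p => if C u p then max a (f u p) else a) a) a ≤ b := by
  intro L
  induction L with
  | nil => intro a b h _; simpa using h
  | cons u us ih =>
    intro a b h hx
    simp only [List.foldl_cons]
    refine ih _ _ ?_ (fun y hy hP p hp hC => hx y (by simp [hy]) hP p hp hC)
    split
    · exact h
    · exact pvCmaxLe _ _ _ _ _ h (fun p hp hC => hx u (by simp) ‹_› p hp hC)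

theorem pvNestGeElem {β : Type} (P : Nat → Prop) [DecidablePred P] (G : Nat → List β)
    (C : Nat → β → Prop) [∀ u, DecidablePred (C u)] (f : Nat → β → Int) :
    ∀ (L : List Nat) (a : Int) (u : Nat) (p : β), u ∈ L → ¬ P u → p ∈ G u → C u p →
    f u p ≤ L.foldl (fun a u => if P u then a
      else (G u).foldl (fun a p => if C u p then max a (f u p) else a) a) a := by
  intro L
  induction L with
  | nil => intro a u p hu; cases hu
  | cons y ys ih =>
    intro a u p hu hP hp hC
    simp only [List.foldl_cons]
    rcases List.mem_cons.mp hu with rfl | hmem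
    · refine le_trans ?_ (pvFoldMonoGe _ (fun a x => by
        split
        · exact le_refl a
        · exact pvFoldMonoGe _ (fun a p => by split <;> simp) _ a) ys _)
      rw [if_neg hP]
      exact pvCmaxGeElem _ _ _ _ p hp hC
    · exact ih _ u p hmem hP hp hC

theorem pvNestId {β : Type} (P : Nat → Prop) [DecidablePred P] (G : Nat → List β)
    (C : Nat → β → Prop) [∀ u, DecidablePred (C u)] (f : Nat → β → Int) :
    ∀ (L : List Nat) (a : Int), (∀ u ∈ L, ¬ P u → ∀ p ∈ G u, ¬ C u p) →
    L.foldl (fun a u => if P u then a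
      else (G u).foldl (fun a p => if C u p then max a (f u p) else a) a) a = a := by
  intro L
  induction L with
  | nil => intro a _; rfl
  | cons u us ih =>
    intro a h
    simp only [List.foldl_cons]
    have hstep : (if P u then a
        else (G u).foldl (fun a p => if C u p then max a (f u p) else a) a) = a := by
      split
      · rfl
      · exact pvCmaxId _ _ _ _ (fun p hp => h u (by simp) ‹_› p hp)
    rw [hstep]
    exact ih a (fun y hy => h y (by simp [hy]))

-- ---- the value of A's dp table after the masks < t have been processed ----
def pvDpVal (g : Int → List (Int × Int)) (k : Int) (N t M u : Nat) : Int :=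
  if u < N ∧ M = 1 <<< u then 0
  else if u < N ∧ M.testBit u = true ∧ (pvPopcount M : Int) ≤ k + 1 ∧ M ^^^ (1 <<< u) < t
    then pvF g M u
  else -1

theorem pvFBase (g : Int → List (Int × Int)) (u : Nat) : pvF g (1 <<< u) u = 0 := by
  rw [pvF]; simp

theorem pvDpValRow (g : Int → List (Int × Int)) (k : Int) (N t u : Nat)
    (hu : u < N) (hc : (pvPopcount t : Int) ≤ k + 1) :
    pvDpVal g k N t t u = if t.testBit u = true then pvF g t u else -1 := by
  unfold pvDpVal
  by_cases h1 : t = 1 <<< u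
  · rw [if_pos ⟨hu, h1⟩]
    have hb : t.testBit u = true := by
      subst h1; simp [Nat.one_shiftLeft, Nat.testBit_two_pow]
    rw [if_pos hb, h1, pvFBase]
  · rw [if_neg (by tauto)]
    by_cases hb : t.testBit u = true
    · rw [if_pos ⟨hu, hb, hc, pvXorTwoPowLt t u hb⟩, if_pos hb]
    · rw [if_neg (by tauto), if_neg hb]

theorem pvDpValSuccNe (g : Int → List (Int × Int)) (k : Int) (N t M u : Nat)
    (h : ¬(u < N ∧ M.testBit u = true ∧ (pvPopcount M : Int) ≤ k + 1 ∧
           M ^^^ (1 <<< u) = t ∧ M ≠ 1 <<< u)) :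
    pvDpVal g k N (t + 1) M u = pvDpVal g k N t M u := by
  unfold pvDpVal
  by_cases h1 : u < N ∧ M = 1 <<< u
  · rw [if_pos h1, if_pos h1]
  · rw [if_neg h1, if_neg h1]
    have hiff : (u < N ∧ M.testBit u = true ∧ (pvPopcount M : Int) ≤ k + 1 ∧ M ^^^ (1 <<< u) < t + 1)
        ↔ (u < N ∧ M.testBit u = true ∧ (pvPopcount M : Int) ≤ k + 1 ∧ M ^^^ (1 <<< u) < t) := by
      constructor
      · rintro ⟨a, b, c, d⟩
        refine ⟨a, b, c, ?_⟩
        rcases Nat.lt_succ_iff_lt_or_eq.mp d with h' | h'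
        · exact h'
        · exact absurd ⟨a, b, c, h', fun hM => h1 ⟨a, hM⟩⟩ h
      · rintro ⟨a, b, c, d⟩; exact ⟨a, b, c, Nat.lt_succ_of_lt d⟩
    by_cases h2 : u < N ∧ M.testBit u = true ∧ (pvPopcount M : Int) ≤ k + 1 ∧ M ^^^ (1 <<< u) < t
    · rw [if_pos (hiff.mpr h2), if_pos h2]
    · rw [if_neg (fun hx => h2 (hiff.mp hx)), if_neg h2]

theorem pvRemoveBit (M u t : Nat) (hb : M.testBit u = true) (he : M ^^^ (1 <<< u) = t) :
    M = t ||| (1 <<< u) ∧ t.testBit u = false ∧ pvPopcount M = pvPopcount t + 1 := by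
  have hM : M = t ||| (1 <<< u) := by rw [← he, pvXorOr M u hb]
  have htb : t.testBit u = false := by
    rw [← he]
    simp [Nat.testBit_xor, hb, Nat.one_shiftLeft, Nat.testBit_two_pow]
  refine ⟨hM, htb, ?_⟩
  rw [hM, pvPopcountOr t u htb]

theorem pvDpInitVal (N : Nat) : ∀ (M u : Nat),
    pvDpInit N M u = if u < N ∧ M = 1 <<< u then 0 else -1 := by
  induction N with
  | zero => intro M u; simp [pvDpInit]
  | succ N ih =>
    intro M u
    have hstep : pvDpInit (N + 1) M u
        = if M = 1 <<< N ∧ u = N then 0 else pvDpInit N M u := by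
      unfold pvDpInit
      rw [List.range_succ, List.foldl_append]
      simp
    rw [hstep]
    by_cases h1 : M = 1 <<< N ∧ u = N
    · rw [if_pos h1, if_pos ⟨by omega, by rw [h1.2]; exact h1.1⟩]
    · rw [if_neg h1, ih]
      by_cases h2 : u < N ∧ M = 1 <<< u
      · rw [if_pos h2, if_pos ⟨by omega, h2.2⟩]
      · rw [if_neg h2, if_neg ?_]
        rintro ⟨ha, hb⟩
        rcases Nat.lt_succ_iff_lt_or_eq.mp ha with h' | h'
        · exact h2 ⟨h', hb⟩
        · exact h1 ⟨by rw [← h']; exact hb, h'⟩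

theorem pvDpInitEq (g : Int → List (Int × Int)) (k : Int) (N : Nat) :
    pvDpInit N = fun M u => pvDpVal g k N 0 M u := by
  funext M u
  rw [pvDpInitVal N M u]
  unfold pvDpVal
  by_cases h1 : u < N ∧ M = 1 <<< u
  · rw [if_pos h1, if_pos h1]
  · rw [if_neg h1, if_neg h1, if_neg (by rintro ⟨_, _, _, h⟩; omega)]

theorem pvBStep_ge (g : Int → List (Int × Int)) (N : Nat) (k : Int) (ans : Int) (mask : Nat) :
    ans ≤ pvBStep g N k ans mask := by
  unfold pvBStep
  split
  · exact pvFoldMonoGe _ (fun a u => by split <;> simp) _ _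
  · exact le_refl _

theorem pvBFold_ge (g : Int → List (Int × Int)) (N : Nat) (k : Int) (t : Nat) :
    -1 ≤ (List.range t).foldl (pvBStep g N k) (-1) :=
  pvFoldMonoGe _ (fun a mask => pvBStep_ge g N k a mask) _ _

theorem pvEdgeFold (g : Int → List (Int × Int)) (k : Int) (N t u : Nat) :
    ∀ (E : List (Int × Int)) (st : (Nat → Nat → Int) × Int),
    (∀ w', st.1 t w' = pvDpVal g k N t t w') →
    E.foldl (fun (st3 : (Nat → Nat → Int) × Int) p =>
      if t &&& (1 <<< p.1.toNat) = 0 then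
        (fun m w => if m = t ||| (1 <<< p.1.toNat) ∧ w = p.1.toNat
                    then max (st3.1 m w) (st3.1 t u + p.2) else st3.1 m w, st3.2)
      else st3) st
    = (fun M w => E.foldl (fun a p =>
        if (t &&& (1 <<< p.1.toNat) = 0 ∧ M = t ||| (1 <<< p.1.toNat) ∧ w = p.1.toNat) then max a (pvDpVal g k N t t u + p.2) else a) (st.1 M w), st.2) := by
  intro E
  induction E with
  | nil => intro st h; rfl
  | cons p E' ih =>
    intro st hrow
    simp only [List.foldl_cons]
    by_cases hcp : t &&& (1 <<< p.1.toNat) = 0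
    · rw [if_pos hcp]
      have htb : t.testBit p.1.toNat = false := (pvAndTwoPowZero _ _).mp hcp
      have hne : t ||| (1 <<< p.1.toNat) ≠ t := pvOrNe _ _ htb
      have hrow' : ∀ w', ((fun m w => if m = t ||| (1 <<< p.1.toNat) ∧ w = p.1.toNat
          then max (st.1 m w) (st.1 t u + p.2) else st.1 m w, st.2) :
            (Nat → Nat → Int) × Int).1 t w' = pvDpVal g k N t t w' := by
        intro w'
        dsimp only
        rw [if_neg (by rintro ⟨h1, _⟩; exact hne h1.symm)]
        exact hrow w'
      rw [ih _ hrow']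
      refine Prod.ext ?_ rfl
      funext M w
      dsimp only
      congr 1
      by_cases hcc : M = t ||| (1 <<< p.1.toNat) ∧ w = p.1.toNat
      · rw [if_pos hcc, if_pos ⟨hcp, hcc.1, hcc.2⟩, hrow u]
      · rw [if_neg hcc, if_neg (by rintro ⟨_, h2, h3⟩; exact hcc ⟨h2, h3⟩)]
    · rw [if_neg hcp, ih _ hrow]
      refine Prod.ext ?_ rfl
      funext M w
      dsimp only
      congr 1
      rw [if_neg (by rintro ⟨h1, _⟩; exact hcp h1)]

theorem pvOuterFold (g : Int → List (Int × Int)) (k : Int) (N t : Nat)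
    (heq : ¬((pvPopcount t : Int) = k + 1)) :
    ∀ (L : List Nat) (st : (Nat → Nat → Int) × Int),
    (∀ w', st.1 t w' = pvDpVal g k N t t w') →
    L.foldl (fun (st2 : (Nat → Nat → Int) × Int) u =>
      if st2.1 t u = -1 then st2
      else if ((pvPopcount t : Int)) = k + 1 then (st2.1, max st2.2 (st2.1 t u))
      else (g ↑u).foldl (fun (st3 : (Nat → Nat → Int) × Int) p =>
          if t &&& (1 <<< p.1.toNat) = 0 then
            (fun m w => if m = t ||| (1 <<< p.1.toNat) ∧ w = p.1.toNat
                        then max (st3.1 m w) (st3.1 t u + p.2) else st3.1 m w, st3.2)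
          else st3) st2) st
    = (fun M w => L.foldl (fun a u => if pvDpVal g k N t t u = -1 then a
        else (g ↑u).foldl (fun a p =>
          if (t &&& (1 <<< p.1.toNat) = 0 ∧ M = t ||| (1 <<< p.1.toNat) ∧ w = p.1.toNat) then max a (pvDpVal g k N t t u + p.2) else a) a)
        (st.1 M w), st.2) := by
  intro L
  induction L with
  | nil => intro st h; rfl
  | cons u us ih =>
    intro st hrow
    simp only [List.foldl_cons]
    by_cases hd : st.1 t u = -1
    · rw [if_pos hd, ih _ hrow]
      refine Prod.ext ?_ rfl
      funext M w
      dsimp only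
      congr 1
      rw [if_pos (by rw [← hrow u]; exact hd)]
    · rw [if_neg hd, if_neg heq]
      rw [pvEdgeFold g k N t u (g ↑u) st hrow]
      have hrow' : ∀ w', ((fun M w => (g ↑u).foldl (fun a p =>
          if (t &&& (1 <<< p.1.toNat) = 0 ∧ M = t ||| (1 <<< p.1.toNat) ∧ w = p.1.toNat) then max a (pvDpVal g k N t t u + p.2) else a) (st.1 M w), st.2) :
            (Nat → Nat → Int) × Int).1 t w' = pvDpVal g k N t t w' := by
        intro w'
        dsimp only
        rw [pvCmaxId _ _ _ _ ?_]
        · exact hrow w'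
        · intro p hp
          rintro ⟨h1, h2, h3⟩
          exact pvOrNe t p.1.toNat ((pvAndTwoPowZero _ _).mp h1) h2.symm
      rw [ih _ hrow']
      refine Prod.ext ?_ rfl
      funext M w
      dsimp only
      congr 1
      rw [if_neg (by rw [← hrow u]; exact hd)]

theorem pvInnerAns (g : Int → List (Int × Int)) (k : Int) (N t : Nat)
    (heq : (pvPopcount t : Int) = k + 1) :
    ∀ (L : List Nat), (∀ u ∈ L, u < N) → ∀ (a : Int), -1 ≤ a →
    L.foldl (fun (st2 : (Nat → Nat → Int) × Int) u =>
      if st2.1 t u = -1 then st2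
      else if ((pvPopcount t : Int)) = k + 1 then (st2.1, max st2.2 (st2.1 t u))
      else (g ↑u).foldl (fun (st3 : (Nat → Nat → Int) × Int) p =>
          if t &&& (1 <<< p.1.toNat) = 0 then
            (fun m w => if m = t ||| (1 <<< p.1.toNat) ∧ w = p.1.toNat
                        then max (st3.1 m w) (st3.1 t u + p.2) else st3.1 m w, st3.2)
          else st3) st2) ((fun M u => pvDpVal g k N t M u), a)
    = ((fun M u => pvDpVal g k N t M u),
       L.foldl (fun a u => if t.testBit u then max a (pvF g t u) else a) a) := by
  have hc : (pvPopcount t : Int) ≤ k + 1 := le_of_eq heq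
  intro L
  induction L with
  | nil => intro _ a _; rfl
  | cons u us ih =>
    intro hL a ha
    have hu : u < N := hL u (by simp)
    have hL' : ∀ y ∈ us, y < N := fun y hy => hL y (by simp [hy])
    simp only [List.foldl_cons]
    have hrowu : pvDpVal g k N t t u = if t.testBit u = true then pvF g t u else -1 :=
      pvDpValRow g k N t u hu hc
    by_cases hb : t.testBit u = true
    · rw [if_pos hb] at hrowu
      by_cases hf : pvF g t u = -1
      · have hd : ((fun M u => pvDpVal g k N t M u) : Nat → Nat → Int) t u = -1 := by
          dsimp only; rw [hrowu, hf]
        rw [if_pos hd, ih hL' a ha, if_pos hb, hf, max_eq_left ha]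
      · have hd : ¬(((fun M u => pvDpVal g k N t M u) : Nat → Nat → Int) t u = -1) := by
          dsimp only; rw [hrowu]; exact hf
        rw [if_neg hd, if_pos heq]
        have : (((fun M u => pvDpVal g k N t M u) : Nat → Nat → Int), 
            max a (((fun M u => pvDpVal g k N t M u) : Nat → Nat → Int) t u))
            = (((fun M u => pvDpVal g k N t M u) : Nat → Nat → Int), max a (pvF g t u)) := by
          refine Prod.ext rfl ?_
          dsimp only; rw [hrowu]
        rw [this, ih hL' _ (le_trans ha (le_max_left _ _)), if_pos hb]
    · rw [if_neg hb] at hrowu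
      have hd : ((fun M u => pvDpVal g k N t M u) : Nat → Nat → Int) t u = -1 := by
        dsimp only; rw [hrowu]
      rw [if_pos hd, ih hL' a ha, if_neg (by simpa using hb)]

theorem pvCellEq (g : Int → List (Int × Int)) (k : Int) (N : Nat)
    (HB : ∀ (x : Int) (p : Int × Int), p ∈ g x → 0 ≤ p.1 ∧ p.1.toNat < N)
    (HS : ∀ (a b c : Int), (b, c) ∈ g a ↔ (a, c) ∈ g b)
    (t : Nat) (hlt : (pvPopcount t : Int) < k + 1) (M w : Nat) :
    (List.range N).foldl (fun a u => if pvDpVal g k N t t u = -1 then a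
        else (g ↑u).foldl (fun a p =>
          if (t &&& (1 <<< p.1.toNat) = 0 ∧ M = t ||| (1 <<< p.1.toNat) ∧ w = p.1.toNat) then max a (pvDpVal g k N t t u + p.2) else a) a)
      (pvDpVal g k N t M w)
    = pvDpVal g k N (t + 1) M w := by
  have hc : (pvPopcount t : Int) ≤ k + 1 := le_of_lt hlt
  by_cases hCC : w < N ∧ M.testBit w = true ∧ M ^^^ (1 <<< w) = t ∧ ¬(M = 1 <<< w)
  · -- the cell that A's processing of mask t fills: it receives exactly pvF g M w
    obtain ⟨hwN, hMb, hxor, hMne⟩ := hCC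
    obtain ⟨hM, htb, hpc⟩ := pvRemoveBit M w t hMb hxor
    have hstart : pvDpVal g k N t M w = -1 := by
      unfold pvDpVal
      rw [if_neg (fun h => hMne h.2),
        if_neg (by rintro ⟨_, _, _, h4⟩; rw [hxor] at h4; exact lt_irrefl t h4)]
    have hpcM : (pvPopcount M : Int) ≤ k + 1 := by rw [hpc]; push_cast; omega
    have htgt : pvDpVal g k N (t + 1) M w = pvF g M w := by
      unfold pvDpVal
      rw [if_neg (fun h => hMne h.2), if_pos ⟨hwN, hMb, hpcM, by rw [hxor]; omega⟩]
    rw [hstart, htgt]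
    have hFdef : pvF g M w = (g ↑w).foldl (fun a q =>
        if (t.testBit q.1.toNat = true ∧ ¬(pvF g t q.1.toNat = -1))
        then max a (pvF g t q.1.toNat + q.2) else a) (-1) := by
      rw [pvF, if_neg hMne, dif_pos hMb, hxor]
      congr 1
      funext a q
      split_ifs <;> first | rfl | tauto
    rw [hFdef]
    refine le_antisymm ?_ ?_
    · refine pvNestLe _ _ _ _ (List.range N) _ _ ?_ ?_
      · exact pvFoldMonoGe _ (fun a q => by split <;> simp) _ _
      · intro u hu hP p hp hcond
        obtain ⟨h1, h2, h3⟩ := hcond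
        have hp1 : 0 ≤ p.1 := (HB _ p hp).1
        have hpw : p.1 = (w : Int) := by omega
        have hrow := pvDpValRow g k N t u (List.mem_range.mp hu) hc
        by_cases hbu : t.testBit u = true
        · rw [if_pos hbu] at hrow
          have hFu : ¬ (pvF g t u = -1) := by rw [hrow] at hP; exact hP
          rw [hrow]
          have hmem0 : ((w : Int), p.2) ∈ g ↑u := by
            have : (p.1, p.2) ∈ g ↑u := by simpa using hp
            rwa [hpw] at this
          have hmem : ((u : Int), p.2) ∈ g (w : Int) := (HS ↑u ↑w p.2).mp hmem0
          have := pvCmaxGeElem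
            (fun q => t.testBit q.1.toNat = true ∧ ¬(pvF g t q.1.toNat = -1))
            (fun q => pvF g t q.1.toNat + q.2) (g ↑w) (-1) ((u : Int), p.2) hmem
            ⟨by simpa using hbu, by simpa using hFu⟩
          simpa using this
        · rw [if_neg hbu] at hrow
          exact absurd hrow hP
    · refine pvCmaxLe _ _ _ _ _ ?_ ?_
      · exact pvNestGeInit _ _ _ _ (List.range N) (-1)
      · intro q hq hcond
        obtain ⟨hbq, hFq⟩ := hcond
        obtain ⟨hq1, hq2⟩ := HB _ q hq
        have hxr : q.1.toNat ∈ List.range N := List.mem_range.mpr hq2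
        have hrow := pvDpValRow g k N t q.1.toNat hq2 hc
        rw [if_pos hbq] at hrow
        have hPx : ¬ (pvDpVal g k N t t q.1.toNat = -1) := by rw [hrow]; exact hFq
        have hmem' : ((w : Int), q.2) ∈ g ↑(q.1.toNat) := by
          have h0 : (q.1, q.2) ∈ g ↑w := by simpa using hq
          have h1 : ((w : Int), q.2) ∈ g q.1 := (HS ↑w q.1 q.2).mp h0
          rwa [show ((q.1.toNat : Nat) : Int) = q.1 from by omega]
        have hcx : t &&& (1 <<< ((w : Int), q.2).1.toNat) = 0 ∧
            M = t ||| (1 <<< ((w : Int), q.2).1.toNat) ∧ w = ((w : Int), q.2).1.toNat := by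
          simp only [Int.toNat_natCast]
          exact ⟨(pvAndTwoPowZero t w).mpr htb, hM, trivial⟩
        have := pvNestGeElem (fun u => pvDpVal g k N t t u = -1) (fun u => g ↑u)
          (fun u p => (t &&& (1 <<< p.1.toNat) = 0 ∧ M = t ||| (1 <<< p.1.toNat) ∧ w = p.1.toNat)) (fun u p => pvDpVal g k N t t u + p.2)
          (List.range N) (-1) q.1.toNat ((w : Int), q.2) hxr hPx hmem' hcx
        simpa only [hrow] using this
  · -- no contribution targets this cell: it keeps its value, which is also unchanged in dpVal
    have harg : ∀ u ∈ List.range N, ¬ (pvDpVal g k N t t u = -1) →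
        ∀ p ∈ g ↑u, ¬ (t &&& (1 <<< p.1.toNat) = 0 ∧ M = t ||| (1 <<< p.1.toNat) ∧ w = p.1.toNat) := by
      intro u hu hP p hp hcond
      obtain ⟨h1, h2, h3⟩ := hcond
      have htb := (pvAndTwoPowZero _ _).mp h1
      apply hCC
      subst h3
      refine ⟨(HB _ p hp).2, by rw [h2]; exact pvOrTestBitSelf _ _,
        by rw [h2]; exact pvOrXor _ _ htb, ?_⟩
      intro he
      rw [h2] at he
      have ht0 : t = 0 := pvOrEqPow _ _ htb he
      subst ht0
      have hrow := pvDpValRow g k N 0 u (List.mem_range.mp hu) hc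
      rw [if_neg (by simp)] at hrow
      exact hP hrow
    have hid := pvNestId (fun u => pvDpVal g k N t t u = -1) (fun u => g ↑u)
      (fun u p => (t &&& (1 <<< p.1.toNat) = 0 ∧ M = t ||| (1 <<< p.1.toNat) ∧ w = p.1.toNat)) (fun u p => pvDpVal g k N t t u + p.2)
      (List.range N) (pvDpVal g k N t M w) harg
    refine Eq.trans hid ?_
    exact (pvDpValSuccNe g k N t M w (by rintro ⟨a, b, c, d, e⟩; exact hCC ⟨a, b, d, e⟩)).symm

theorem pvStep (g : Int → List (Int × Int)) (k : Int) (N : Nat)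
    (HB : ∀ (x : Int) (p : Int × Int), p ∈ g x → 0 ≤ p.1 ∧ p.1.toNat < N)
    (HS : ∀ (a b c : Int), (b, c) ∈ g a ↔ (a, c) ∈ g b)
    (t : Nat) (ans : Int) (hans : -1 ≤ ans) :
    pvAStep g k N (fun M u => pvDpVal g k N t M u, ans) t
      = (fun M u => pvDpVal g k N (t + 1) M u, pvBStep g N k ans t) := by
  simp only [pvAStep]
  by_cases hgt : (pvPopcount t : Int) > k + 1
  · rw [if_pos hgt]
    refine Prod.ext ?_ ?_
    · funext M u
      refine (pvDpValSuccNe g k N t M u ?_).symm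
      rintro ⟨a, b, c, d, e⟩
      obtain ⟨_, _, hpc⟩ := pvRemoveBit M u t b d
      rw [hpc] at c
      push_cast at c
      omega
    · show ans = pvBStep g N k ans t
      unfold pvBStep
      rw [if_neg (by intro h; omega)]
  · rw [if_neg hgt]
    by_cases heq : (pvPopcount t : Int) = k + 1
    · rw [pvInnerAns g k N t heq (List.range N) (fun u hu => List.mem_range.mp hu) ans hans]
      refine Prod.ext ?_ ?_
      · funext M u
        refine (pvDpValSuccNe g k N t M u ?_).symm
        rintro ⟨a, b, c, d, e⟩
        obtain ⟨_, _, hpc⟩ := pvRemoveBit M u t b d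
        rw [hpc] at c
        push_cast at c
        omega
      · show _ = pvBStep g N k ans t
        unfold pvBStep
        rw [if_pos heq]
    · rw [pvOuterFold g k N t heq (List.range N)
        ((fun M u => pvDpVal g k N t M u), ans) (fun w' => rfl)]
      refine Prod.ext ?_ ?_
      · funext M w
        exact pvCellEq g k N HB HS t (by omega) M w
      · show ans = pvBStep g N k ans t
        unfold pvBStep
        rw [if_neg heq]

theorem pvMainLoop (g : Int → List (Int × Int)) (k : Int) (N : Nat)
    (HB : ∀ (x : Int) (p : Int × Int), p ∈ g x → 0 ≤ p.1 ∧ p.1.toNat < N)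
    (HS : ∀ (a b c : Int), (b, c) ∈ g a ↔ (a, c) ∈ g b) (t : Nat) :
    (List.range t).foldl (pvAStep g k N) (pvDpInit N, -1)
      = (fun M u => pvDpVal g k N t M u, (List.range t).foldl (pvBStep g N k) (-1)) := by
  induction t with
  | zero => simp only [List.range_zero, List.foldl_nil]; rw [pvDpInitEq g k N]
  | succ t ih =>
    rw [List.range_succ, List.foldl_append, List.foldl_append, ih]
    simp only [List.foldl_cons, List.foldl_nil]
    exact pvStep g k N HB HS t _ (pvBFold_ge g N k t)

-- ===== VERDICT (by name: the statement is the Claim_ definition above) =====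
theorem maximumCost_spec : Claim_equal_maximumCost := by
  intro n hws k _ hpre
  unfold Spec_maximumCost maximumCost maximumCost_alt
  by_cases hk : k + 1 > n
  · simp only [if_pos hk]
  · obtain ⟨hn, hrows⟩ : 0 ≤ n ∧ hws.all (pvRowOK n) = true := by
      rcases hpre with h | ⟨hk', _, _⟩
      · exact h
      · exact absurd hk' hk
    simp only [if_neg hk]
    have HB : ∀ (x : Int) (p : Int × Int), p ∈ pvBuildGraph hws x →
        0 ≤ p.1 ∧ p.1.toNat < n.toNat := by
      intro x p hp
      have := pvGraphBnd n hws hrows x p hp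
      omega
    rw [pvMainLoop (pvBuildGraph hws) k n.toNat HB (fun a b c => pvGraphSym hws a b c)
      (1 <<< n.toNat)]
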